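-- pv_equiv track=rewrite | github.com/fronchetti/OSS-2019 | scripts/inflow.py | get_number_of_weeks
-- ===== SOURCE A (Python) =====
-- def get_number_of_weeks(weekly_series):
--     weekly_max = None
--     weekly_min = None
--
--     for series in weekly_series.values():
--         if series:
--             if weekly_min is not None:
--                 if min(series) < weekly_min:
--                     weekly_min = min(series)
--             else:
--                 weekly_min = min(series)
--
--             if weekly_max is not None:
--                 if max(series) > weekly_max:
--                     weekly_max = max(series)
--             else:
--                 weekly_max = max(series)
--
--     return weekly_min, weekly_max
-- ===== SOURCE B (Python) =====
-- def get_number_of_weeks(weekly_series):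
--     vals = [v for series in weekly_series.values() for v in series]
--     if not vals:
--         return None, None
--     return min(vals), max(vals)
-- ===== Notes on version B (the rewrite author's own statement) =====
-- stated objective: simpler
-- what changed: Replaces the streaming per-series min/max with conditional running-extrema updates by flattening all values once and taking a single global min and max of the flat list.
import Mathlib
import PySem

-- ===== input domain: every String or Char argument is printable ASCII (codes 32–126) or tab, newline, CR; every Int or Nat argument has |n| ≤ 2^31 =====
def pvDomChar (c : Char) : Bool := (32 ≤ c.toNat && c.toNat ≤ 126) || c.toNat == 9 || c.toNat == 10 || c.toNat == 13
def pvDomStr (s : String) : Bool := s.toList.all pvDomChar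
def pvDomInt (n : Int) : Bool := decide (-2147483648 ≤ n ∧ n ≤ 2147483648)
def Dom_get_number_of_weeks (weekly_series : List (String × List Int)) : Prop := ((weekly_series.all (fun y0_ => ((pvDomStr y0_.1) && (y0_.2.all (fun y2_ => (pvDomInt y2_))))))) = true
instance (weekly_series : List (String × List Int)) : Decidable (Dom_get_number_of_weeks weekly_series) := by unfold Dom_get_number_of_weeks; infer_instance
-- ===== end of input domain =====

-- ===== PORT A =====
-- B flattens all values and takes one global min/max instead of A's streaming per-series extrema (objective: simpler).
def pvStepA (st : Option Int × Option Int) (series : List Int) : Option Int × Option Int :=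
  if series.isEmpty then st
  else
    let mn :=
      match st.1 with
      | some m =>
        match PySem.List.min? series (fun y => y) with
        | some s => if s < m then some s else some m
        | none => some m
      | none => PySem.List.min? series (fun y => y)
    let mx :=
      match st.2 with
      | some m =>
        match PySem.List.max? series (fun y => y) with
        | some s => if m < s then some s else some m
        | none => some m
      | none => PySem.List.max? series (fun y => y)
    (mn, mx)

def get_number_of_weeks (weekly_series : List (String × List Int)) : Option Int × Option Int :=
  (PySem.Dict.ofList weekly_series).values.foldl pvStepA (none, none)

-- ===== PORT B =====
def get_number_of_weeks_alt (weekly_series : List (String × List Int)) : Option Int × Option Int :=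
  let vals := ((PySem.Dict.ofList weekly_series).values).flatMap (fun s => s)
  if vals.isEmpty then (none, none)
  else (PySem.List.min? vals (fun y => y), PySem.List.max? vals (fun y => y))

-- ===== PRECONDITION & SPEC =====
def Spec_get_number_of_weeks (weekly_series : List (String × List Int)) (out : Option Int × Option Int) : Prop := out = get_number_of_weeks_alt weekly_series
instance (weekly_series : List (String × List Int)) (out : Option Int × Option Int) : Decidable (Spec_get_number_of_weeks weekly_series out) := by unfold Spec_get_number_of_weeks; infer_instance

-- ===== CLAIM =====
def Claim_equal_get_number_of_weeks : Prop := ∀ (weekly_series : List (String × List Int)), Dom_get_number_of_weeks weekly_series → Spec_get_number_of_weeks weekly_series (get_number_of_weeks weekly_series)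

-- ===== LEMMAS AND PROOFS =====
def pvOMin (a b : Option Int) : Option Int :=
  match a, b with
  | none, b => b
  | a, none => a
  | some x, some y => some (min x y)

def pvOMax (a b : Option Int) : Option Int :=
  match a, b with
  | none, b => b
  | a, none => a
  | some x, some y => some (max x y)

@[simp] theorem pvMinNil : PySem.List.min? ([] : List Int) (fun y => y) = none := by
  simp [PySem.List.min?_eq_none_iff]

@[simp] theorem pvMaxNil : PySem.List.max? ([] : List Int) (fun y => y) = none := by
  simp [PySem.List.max?_eq_none_iff]

@[simp] theorem pvOMin_none_right (a : Option Int) : pvOMin a none = a := by cases a <;> rfl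
@[simp] theorem pvOMax_none_right (a : Option Int) : pvOMax a none = a := by cases a <;> rfl
@[simp] theorem pvOMin_none_left (b : Option Int) : pvOMin none b = b := rfl
@[simp] theorem pvOMax_none_left (b : Option Int) : pvOMax none b = b := rfl

theorem pvMinStep (m s : Int) : (if s < m then some s else some m) = some (min m s) := by
  rcases lt_or_ge s m with h | h
  · rw [if_pos h, min_eq_right h.le]
  · rw [if_neg (not_lt.mpr h), min_eq_left h]

theorem pvMaxStep (m s : Int) : (if m < s then some s else some m) = some (max m s) := by
  rcases lt_or_ge m s with h | h
  · rw [if_pos h, max_eq_right h.le]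
  · rw [if_neg (not_lt.mpr h), max_eq_left h]

theorem pvFoldlMin (t : List Int) (a b : Int) :
    t.foldl min (min a b) = min a (t.foldl min b) := by
  induction t generalizing b with
  | nil => rfl
  | cons c t ih =>
    simp only [List.foldl_cons]
    rw [min_assoc, ih]

theorem pvFoldlMax (t : List Int) (a b : Int) :
    t.foldl max (max a b) = max a (t.foldl max b) := by
  induction t generalizing b with
  | nil => rfl
  | cons c t ih =>
    simp only [List.foldl_cons]
    rw [max_assoc, ih]

theorem pvMinAppend (s t : List Int) :
    PySem.List.min? (s ++ t) (fun y => y) =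
      pvOMin (PySem.List.min? s (fun y => y)) (PySem.List.min? t (fun y => y)) := by
  cases s with
  | nil => simp
  | cons x s' =>
    rw [List.cons_append, PySem.List.min?_id_cons, PySem.List.min?_id_cons]
    cases t with
    | nil => simp
    | cons y t' =>
      rw [PySem.List.min?_id_cons]
      simp only [pvOMin, List.foldl_append, List.foldl_cons]
      rw [pvFoldlMin t' (s'.foldl min x) y]

theorem pvMaxAppend (s t : List Int) :
    PySem.List.max? (s ++ t) (fun y => y) =
      pvOMax (PySem.List.max? s (fun y => y)) (PySem.List.max? t (fun y => y)) := by
  cases s with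
  | nil => simp
  | cons x s' =>
    rw [List.cons_append, PySem.List.max?_id_cons, PySem.List.max?_id_cons]
    cases t with
    | nil => simp
    | cons y t' =>
      rw [PySem.List.max?_id_cons]
      simp only [pvOMax, List.foldl_append, List.foldl_cons]
      rw [pvFoldlMax t' (s'.foldl max x) y]

theorem pvStepA_eq (st : Option Int × Option Int) (series : List Int) :
    pvStepA st series =
      (pvOMin st.1 (PySem.List.min? series (fun y => y)),
       pvOMax st.2 (PySem.List.max? series (fun y => y))) := by
  obtain ⟨a, b⟩ := st
  cases series with
  | nil => simp [pvStepA]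
  | cons x s' =>
    simp only [pvStepA, List.isEmpty_cons, Bool.false_eq_true, if_false]
    rw [PySem.List.min?_id_cons, PySem.List.max?_id_cons]
    cases a <;> cases b <;> simp [pvOMin, pvOMax, pvMinStep, pvMaxStep]

theorem pvOMin_assoc (a b c : Option Int) : pvOMin (pvOMin a b) c = pvOMin a (pvOMin b c) := by
  cases a <;> cases b <;> cases c <;> simp [pvOMin, min_assoc]

theorem pvOMax_assoc (a b c : Option Int) : pvOMax (pvOMax a b) c = pvOMax a (pvOMax b c) := by
  cases a <;> cases b <;> cases c <;> simp [pvOMax, max_assoc]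

theorem pvFoldA (l : List (List Int)) (a b : Option Int) :
    l.foldl pvStepA (a, b) =
      (pvOMin a (PySem.List.min? (l.flatMap (fun s => s)) (fun y => y)),
       pvOMax b (PySem.List.max? (l.flatMap (fun s => s)) (fun y => y))) := by
  induction l generalizing a b with
  | nil => simp
  | cons s l ih =>
    simp only [List.foldl_cons, List.flatMap_cons]
    rw [pvStepA_eq, ih, pvMinAppend, pvMaxAppend, pvOMin_assoc, pvOMax_assoc]

-- ===== VERDICT =====
theorem get_number_of_weeks_spec : Claim_equal_get_number_of_weeks := by
  intro ws _
  unfold Spec_get_number_of_weeks get_number_of_weeks get_number_of_weeks_alt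
  rw [pvFoldA]
  by_cases h : (((PySem.Dict.ofList ws).values).flatMap (fun s => s)).isEmpty
  · rw [List.isEmpty_iff] at h
    simp [h]
  · simp
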